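-- pv_equiv track=rewrite | github.com/xhanrot/c8dasm | disassembly_writer.py | get_sprite_string
-- ===== SOURCE A (Python) =====
-- def get_sprite_string(data):
--     sprite = ""
--     for i in range(8):
--         if data & 0x1:
--             sprite += "1"
--         else:
--             sprite += " "
--         data = data >> 1
--
--     return sprite
-- ===== SOURCE B (Python) =====
-- def get_sprite_string(data):
--     bits = format(data % 256, '08b')   # low 8 bits, MSB-first
--     return bits[::-1].replace('0', ' ')
-- ===== Notes on version B (the rewrite author's own statement) =====
-- stated objective: idiomatic
-- what changed: Replaces the explicit 8-iteration bit-shift/append loop by a single library format of the low byte (format(data % 256, '08b')), then a reverse to LSB-first order and a replace of '0' with ' '.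
import Mathlib
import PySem

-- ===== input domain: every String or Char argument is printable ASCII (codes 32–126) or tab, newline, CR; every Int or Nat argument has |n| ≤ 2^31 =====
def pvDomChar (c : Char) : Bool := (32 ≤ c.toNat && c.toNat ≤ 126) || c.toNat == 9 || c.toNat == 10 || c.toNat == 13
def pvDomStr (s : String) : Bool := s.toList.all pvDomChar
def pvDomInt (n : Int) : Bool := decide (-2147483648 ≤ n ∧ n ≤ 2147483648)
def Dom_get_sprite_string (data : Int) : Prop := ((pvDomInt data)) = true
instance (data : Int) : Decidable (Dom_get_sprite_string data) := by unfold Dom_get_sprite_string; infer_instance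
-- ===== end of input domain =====

-- B replaces A's 8-step bit-shifting loop by one library format of the low byte
-- (format(data % 256, '08b')) followed by reverse and replace — objective: idiomatic.

-- ===== PORT A =====
-- literal port of A: fold over range(8) with state (data, sprite);
-- `data & 0x1` is PySem.Int.band data 1, `data >> 1` is `data >>> 1` (PYSEM shift rule);
-- the sprite accumulator is kept as List Char (the PySem-endorsed String representation).
def get_sprite_string (data : Int) : String :=
  let st := (List.range 8).foldl
    (fun (st : Int × List Char) (_ : Nat) =>
      let sprite := if PySem.Int.band st.1 1 ≠ 0 then st.2 ++ ['1'] else st.2 ++ [' ']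
      (st.1 >>> (1 : Nat), sprite))
    (data, ([] : List Char))
  String.ofList st.2

-- ===== PORT B =====
-- literal port of Source B: format(data % 256, '08b') = zfill of the binary digits
-- (PySem.Int.toBinChars / PySem.Chars.zfill); bits[::-1] is List.reverse
-- (PySem.List.slice?_none_none_neg_one); .replace('0', ' ') is PySem.Chars.replace.
def get_sprite_string_alt (data : Int) : String :=
  let bits := PySem.Chars.zfill (PySem.Int.toBinChars (PySem.Int.mod data 256)) 8
  String.ofList (PySem.Chars.replace bits.reverse ['0'] [' '])

-- ===== PRECONDITION & SPEC =====
def Spec_get_sprite_string (data : Int) (out : String) : Prop := out = get_sprite_string_alt data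
instance (data : Int) (out : String) : Decidable (Spec_get_sprite_string data out) := by unfold Spec_get_sprite_string; infer_instance

-- ===== CLAIM (what is proved, stated in full; the proofs are below) =====
def Claim_equal_get_sprite_string : Prop := ∀ (data : Int), Dom_get_sprite_string data → Spec_get_sprite_string data (get_sprite_string data)

-- ===== LEMMAS AND PROOFS =====

-- Both ports agree on every residue of the low byte (kernel evaluation of the 256 cases).
set_option maxHeartbeats 4000000 in
set_option maxRecDepth 10000 in
lemma pv_key : ∀ r : Fin 256, get_sprite_string (r : Int) = get_sprite_string_alt (r : Int) := by
  decide

-- A reads only the low 8 bits of its argument.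
lemma pv_A_emod (data : Int) : get_sprite_string data = get_sprite_string (data % 256) := by
  have h1 : data / 2 % 2 = data % 256 / 2 % 2 := by omega
  have h2 : data / 2 / 2 % 2 = data % 256 / 2 / 2 % 2 := by omega
  have h3 : data / 2 / 2 / 2 % 2 = data % 256 / 2 / 2 / 2 % 2 := by omega
  have h4 : data / 2 / 2 / 2 / 2 % 2 = data % 256 / 2 / 2 / 2 / 2 % 2 := by omega
  have h5 : data / 2 / 2 / 2 / 2 / 2 % 2 = data % 256 / 2 / 2 / 2 / 2 / 2 % 2 := by omega
  have h6 : data / 2 / 2 / 2 / 2 / 2 / 2 % 2 = data % 256 / 2 / 2 / 2 / 2 / 2 / 2 % 2 := by omega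
  have h7 : data / 2 / 2 / 2 / 2 / 2 / 2 / 2 % 2 = data % 256 / 2 / 2 / 2 / 2 / 2 / 2 / 2 % 2 := by omega
  simp only [get_sprite_string, List.range_succ, List.foldl_append, List.foldl_cons,
    List.foldl_nil, List.range_zero, PySem.Int.band_one,
    PySem.Int.mod_eq_emod_of_pos (show (0:Int) < 2 by norm_num), Int.shiftRight_eq_div_pow]
  norm_num [h1, h2, h3, h4, h5, h6, h7]

-- B reads only data % 256.
lemma pv_B_emod (data : Int) : get_sprite_string_alt data = get_sprite_string_alt (data % 256) := by
  simp [get_sprite_string_alt, Int.emod_emod_of_dvd _ (dvd_refl 256)]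

-- ===== VERDICT (by name: the statement is the Claim_ definition above) =====
theorem get_sprite_string_spec : Claim_equal_get_sprite_string := by
  intro data _
  unfold Spec_get_sprite_string
  have hnn : 0 ≤ data % 256 := Int.emod_nonneg _ (by norm_num)
  have hlt : data % 256 < 256 := Int.emod_lt_of_pos _ (by norm_num)
  have hk := pv_key ⟨(data % 256).toNat, by omega⟩
  have hc : (((data % 256).toNat : Int)) = data % 256 := Int.toNat_of_nonneg hnn
  rw [pv_A_emod, pv_B_emod]
  simpa [hc] using hk
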